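-- pv_equiv track=rewrite | github.com/cskrasniak/rentals | app.py | remove_md
-- ===== SOURCE A (Python) =====
-- def remove_md(string):
--     """
--     Removes angled brackets (< & >) and the markdown formatting inside them from strings. Should
--     remove anything between two angled brackets, anything before a close bracket if there is only a
--     close bracket, and anything after an open bracket if there is only an open bracket
--
--     Input : str
--     output : str
--     """
--
--     # if both an open and close angle brackets are in the string
--     if ('<' in string) and ('>' in string):
--         open_brac = string.find('<')
--         close_brac = string.find('>')
--         # if there is something inside the brackets, drop that including the brackets
--         if open_brac < close_brac:
--             string = string.replace(string[open_brac : close_brac + 1]," ")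
--         # if there isn't anything in between them, drop everything before and after
--         else:
--             string = string.replace(string[:close_brac+1]," ")
--             string = string.replace(string[open_brac:]," ")
--         # use recursion to fix any instances where there are multiple opens and closes
--         return remove_md(string)
--     elif ('<' in string):
--         open_brac = string.find('<')
--         string = string.replace(string[open_brac:]," ")
--         return remove_md(string)
--     elif ('>' in string):
--         close_brac = string.find('>')
--         string = string.replace(string[:close_brac+1]," ")
--         return remove_md(string)
--     else:
--         return string
-- ===== SOURCE B (Python) =====
-- def _step(string):
--     """One rewrite step; returns the next string, or None when no brackets remain."""
--     o = string.find('<')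
--     c = string.find('>')
--     if o == -1 and c == -1:
--         return None
--     if o == -1:
--         return string.replace(string[:c + 1], " ")
--     if c == -1:
--         return string.replace(string[o:], " ")
--     if o < c:
--         return string.replace(string[o:c + 1], " ")
--     string = string.replace(string[:c + 1], " ")
--     return string.replace(string[o:], " ")
--
--
-- def remove_md(string):
--     """Iterative version: repeatedly apply one replace step until no angle bracket is left."""
--     nxt = _step(string)
--     while nxt is not None:
--         string = nxt
--         nxt = _step(string)
--     return string
-- ===== Notes on version B (the rewrite author's own statement) =====
-- stated objective: alternative
-- what changed: Replaces A's four-way tail recursion by a single-step helper (find() with -1 sentinels instead of membership tests, restructured branch order) driven by an iterative while loop that reassigns the string, performing the identical sequence of replace-all operations.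
import Mathlib
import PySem

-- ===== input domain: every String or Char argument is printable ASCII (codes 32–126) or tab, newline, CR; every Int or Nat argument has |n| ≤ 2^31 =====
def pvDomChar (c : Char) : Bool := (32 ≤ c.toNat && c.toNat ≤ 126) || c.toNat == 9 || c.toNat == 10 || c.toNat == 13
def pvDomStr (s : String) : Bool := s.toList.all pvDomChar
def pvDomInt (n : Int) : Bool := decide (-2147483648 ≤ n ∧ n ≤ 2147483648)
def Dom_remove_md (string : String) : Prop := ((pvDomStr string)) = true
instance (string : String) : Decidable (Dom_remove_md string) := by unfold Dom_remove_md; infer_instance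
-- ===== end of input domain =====

-- B replaces A's four-way tail recursion by a single-step helper (find-based, -1 sentinels)
-- driven by a while loop; objective: alternative (same replace-all semantics, iterative decomposition).

-- ===== PORT A =====
-- A recurses, removing at least one '<' or '>' per call; the fuel (#'<' + #'>' + 1)
-- merely makes the same computation total and is never exhausted on the real trace.
def remove_md_rec (fuel : Nat) (string : String) : String :=
  match fuel with
  | 0 => string
  | fuel + 1 =>
    if PySem.Str.isIn "<" string && PySem.Str.isIn ">" string then
      let open_brac := PySem.Str.find string "<"
      let close_brac := PySem.Str.find string ">"
      if open_brac < close_brac then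
        remove_md_rec fuel
          (PySem.Str.replace string
            (PySem.Str.slice string (some open_brac) (some (close_brac + 1))) " ")
      else
        let s1 := PySem.Str.replace string
          (PySem.Str.slice string none (some (close_brac + 1))) " "
        let s2 := PySem.Str.replace s1 (PySem.Str.slice s1 (some open_brac) none) " "
        remove_md_rec fuel s2
    else if PySem.Str.isIn "<" string then
      let open_brac := PySem.Str.find string "<"
      remove_md_rec fuel
        (PySem.Str.replace string (PySem.Str.slice string (some open_brac) none) " ")
    else if PySem.Str.isIn ">" string then
      let close_brac := PySem.Str.find string ">"
      remove_md_rec fuel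
        (PySem.Str.replace string (PySem.Str.slice string none (some (close_brac + 1))) " ")
    else
      string

def remove_md (string : String) : String :=
  remove_md_rec (PySem.Str.count string "<" + PySem.Str.count string ">" + 1) string

-- ===== PORT B =====
-- one rewrite step; none = no brackets left (Python helper _step returning None)
def remove_md_step (s : String) : Option String :=
  let o := PySem.Str.find s "<"
  let c := PySem.Str.find s ">"
  if o == -1 && c == -1 then none
  else if o == -1 then
    some (PySem.Str.replace s (PySem.Str.slice s none (some (c + 1))) " ")
  else if c == -1 then
    some (PySem.Str.replace s (PySem.Str.slice s (some o) none) " ")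
  else if o < c then
    some (PySem.Str.replace s (PySem.Str.slice s (some o) (some (c + 1))) " ")
  else
    let s' := PySem.Str.replace s (PySem.Str.slice s none (some (c + 1))) " "
    some (PySem.Str.replace s' (PySem.Str.slice s' (some o) none) " ")

-- the while loop, with the same total-making fuel as A's recursion
def remove_md_loop (fuel : Nat) (s : String) : String :=
  match fuel with
  | 0 => s
  | fuel + 1 =>
    match remove_md_step s with
    | none => s
    | some t => remove_md_loop fuel t

def remove_md_alt (string : String) : String :=
  remove_md_loop (PySem.Str.count string "<" + PySem.Str.count string ">" + 1) string

-- ===== PRECONDITION & SPEC =====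
def Spec_remove_md (string : String) (out : String) : Prop := out = remove_md_alt string
instance (string : String) (out : String) : Decidable (Spec_remove_md string out) := by unfold Spec_remove_md; infer_instance

-- ===== CLAIM (what is proved, stated in full; the proofs are below) =====
def Claim_equal_remove_md : Prop := ∀ (string : String), Dom_remove_md string → Spec_remove_md string (remove_md string)

-- ===== LEMMAS AND PROOFS =====

theorem rec_eq_loop (fuel : Nat) (s : String) :
    remove_md_rec fuel s = remove_md_loop fuel s := by
  induction fuel generalizing s with
  | zero => rfl
  | succ fuel ih =>
    rw [remove_md_rec, remove_md_loop, remove_md_step]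
    by_cases h1 : PySem.Chars.isIn ['<'] s.toList = true <;>
      by_cases h2 : PySem.Chars.isIn ['>'] s.toList = true
    · have ho : PySem.Chars.find s.toList ['<'] ≠ -1 := by
        rw [PySem.Chars.find_ne_neg_one_iff]
        exact (PySem.Chars.isIn_iff_infix _ _).mp h1
      have hc : PySem.Chars.find s.toList ['>'] ≠ -1 := by
        rw [PySem.Chars.find_ne_neg_one_iff]
        exact (PySem.Chars.isIn_iff_infix _ _).mp h2
      simp [h1, h2, ho, hc]
      split_ifs <;> simp [ih]
    · have ho : PySem.Chars.find s.toList ['<'] ≠ -1 := by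
        rw [PySem.Chars.find_ne_neg_one_iff]
        exact (PySem.Chars.isIn_iff_infix _ _).mp h1
      have hc : PySem.Chars.find s.toList ['>'] = -1 := by
        rw [PySem.Chars.find_eq_neg_one_iff]
        exact fun h => h2 ((PySem.Chars.isIn_iff_infix _ _).mpr h)
      simp [h1, h2, ho, hc, ih]
    · have ho : PySem.Chars.find s.toList ['<'] = -1 := by
        rw [PySem.Chars.find_eq_neg_one_iff]
        exact fun h => h1 ((PySem.Chars.isIn_iff_infix _ _).mpr h)
      have hc : PySem.Chars.find s.toList ['>'] ≠ -1 := by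
        rw [PySem.Chars.find_ne_neg_one_iff]
        exact (PySem.Chars.isIn_iff_infix _ _).mp h2
      simp [h1, h2, ho, hc, ih]
    · have ho : PySem.Chars.find s.toList ['<'] = -1 := by
        rw [PySem.Chars.find_eq_neg_one_iff]
        exact fun h => h1 ((PySem.Chars.isIn_iff_infix _ _).mpr h)
      have hc : PySem.Chars.find s.toList ['>'] = -1 := by
        rw [PySem.Chars.find_eq_neg_one_iff]
        exact fun h => h2 ((PySem.Chars.isIn_iff_infix _ _).mpr h)
      simp [h1, h2, ho, hc]

theorem remove_md_spec' (string : String) :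
    remove_md string = remove_md_alt string := by
  unfold remove_md remove_md_alt
  exact rec_eq_loop _ _

-- ===== VERDICT (by name: the statement is the Claim_ definition above) =====
theorem remove_md_spec : Claim_equal_remove_md := by
  intro s _
  exact remove_md_spec' s
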